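-- pv_equiv track=rewrite | github.com/handes-yilmaz/master-thesis-gui-bug-repair | OptimizedExperimentFramework/Code/core/localization.py | _fuzzy_match_file
-- ===== SOURCE A (Python) =====
-- from typing import Dict, List, Tuple, Optional
--
-- def _fuzzy_match_file(file_path: str, all_files: List[str]) -> Optional[str]:
--     """Try to match file path fuzzily (handles path variations)"""
--     # Try exact match first
--     if file_path in all_files:
--         return file_path
--
--     # Try removing leading path components
--     parts = file_path.split('/')
--     for i in range(len(parts)):
--         partial = '/'.join(parts[i:])
--         for repo_file in all_files:
--             if repo_file.endswith(partial):
--                 return repo_file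
--
--     # Try matching just the filename
--     filename = parts[-1]
--     matches = [f for f in all_files if f.endswith(filename)]
--     if len(matches) == 1:
--         return matches[0]
--
--     return None
-- ===== SOURCE B (Python) =====
-- from typing import List, Optional
--
-- def _fuzzy_match_file(file_path: str, all_files: List[str]) -> Optional[str]:
--     """Fuzzy path match: single file-major pass tracking the best (longest-suffix) match."""
--     if file_path in all_files:
--         return file_path
--
--     parts = file_path.split('/')
--     n = len(parts)
--
--     def first_suffix_index(f: str) -> int:
--         # smallest i such that f ends with '/'.join(parts[i:]); n if none
--         for i in range(n):
--             if f.endswith('/'.join(parts[i:])):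
--                 return i
--         return n
--
--     best_i, best_file = n, None
--     for f in all_files:
--         i = first_suffix_index(f)
--         if i < best_i:
--             best_i, best_file = i, f
--     return best_file
-- ===== Notes on version B (the rewrite author's own statement) =====
-- stated objective: alternative
-- what changed: The suffix-major nested scan (for each suffix length, rescan all files) plus the dead filename block is replaced by a single file-major pass that computes each file's smallest matching suffix index and keeps the strictly-best first file; the unreachable filename fallback disappears.
import Mathlib
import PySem

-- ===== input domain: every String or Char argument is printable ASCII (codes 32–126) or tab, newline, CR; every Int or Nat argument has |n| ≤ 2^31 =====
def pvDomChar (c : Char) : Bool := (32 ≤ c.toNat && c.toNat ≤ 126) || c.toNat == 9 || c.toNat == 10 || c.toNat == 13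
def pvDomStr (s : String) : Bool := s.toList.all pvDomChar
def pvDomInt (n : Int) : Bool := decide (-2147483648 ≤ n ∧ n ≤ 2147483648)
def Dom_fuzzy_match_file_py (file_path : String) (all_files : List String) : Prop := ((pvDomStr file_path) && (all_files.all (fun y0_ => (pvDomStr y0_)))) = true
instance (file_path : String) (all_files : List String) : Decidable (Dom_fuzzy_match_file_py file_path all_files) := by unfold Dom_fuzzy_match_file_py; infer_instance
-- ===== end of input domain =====

-- B replaces A's suffix-major nested scan (plus its unreachable filename fallback) by one
-- file-major pass keeping the best (smallest suffix index, earliest file) match; same values.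

-- ===== PORT A =====
-- outer loop "for i in range(len(parts)): partial = '/'.join(parts[i:]); for repo_file in
-- all_files: if repo_file.endswith(partial): return repo_file"
def fmfLoopA (parts : List (List Char)) (all_files : List String) (i : Nat) : Option String :=
  if _h : i < parts.length then
    match all_files.find? (fun repo_file =>
        PySem.Chars.endswith repo_file.toList
          (PySem.Chars.join ['/'] (PySem.List.slice parts (some (i : Int)) none))) with
    | some repo_file => some repo_file
    | none => fmfLoopA parts all_files (i + 1)
  else none
termination_by parts.length - i

def fuzzy_match_file_py (file_path : String) (all_files : List String) : Option String :=
  if file_path ∈ all_files then some file_path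
  else
    let parts := PySem.Chars.splitOn file_path.toList ['/']
    match fmfLoopA parts all_files 0 with
    | some repo_file => some repo_file
    | none =>
      let filename := PySem.List.pyGetD parts (-1) []
      let fmatches := all_files.filter (fun f => PySem.Chars.endswith f.toList filename)
      if fmatches.length == 1 then PySem.List.pyGet? fmatches 0 else none

-- ===== PORT B =====
-- helper "first_suffix_index": smallest i with f.endswith('/'.join(parts[i:])), else len(parts)
def fmfIdxB (parts : List (List Char)) (f : List Char) (i : Nat) : Nat :=
  if _h : i < parts.length then
    if PySem.Chars.endswith f
        (PySem.Chars.join ['/'] (PySem.List.slice parts (some (i : Int)) none)) then i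
    else fmfIdxB parts f (i + 1)
  else parts.length
termination_by parts.length - i

def fuzzy_match_file_py_alt (file_path : String) (all_files : List String) : Option String :=
  if file_path ∈ all_files then some file_path
  else
    let parts := PySem.Chars.splitOn file_path.toList ['/']
    (all_files.foldl (fun (acc : Nat × Option String) f =>
        let i := fmfIdxB parts f.toList 0
        if i < acc.1 then (i, some f) else acc)
      (parts.length, none)).2

-- ===== PRECONDITION & SPEC =====
def Spec_fuzzy_match_file_py (file_path : String) (all_files : List String) (out : Option String) : Prop := out = fuzzy_match_file_py_alt file_path all_files
instance (file_path : String) (all_files : List String) (out : Option String) : Decidable (Spec_fuzzy_match_file_py file_path all_files out) := by unfold Spec_fuzzy_match_file_py; infer_instance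

-- ===== CLAIM (what is proved, stated in full; the proofs are below) =====
def Claim_equal_fuzzy_match_file_py : Prop := ∀ (file_path : String) (all_files : List String), Dom_fuzzy_match_file_py file_path all_files → Spec_fuzzy_match_file_py file_path all_files (fuzzy_match_file_py file_path all_files)

-- ===== LEMMAS AND PROOFS =====

-- the suffix-match predicate both ports test (stated in drop form for the proofs)
def fmfPred (parts : List (List Char)) (i : Nat) (f : String) : Bool :=
  PySem.Chars.endswith f.toList (PySem.Chars.join ['/'] (parts.drop i))

-- the fold step of port B, at suffix start index i (B uses i = 0)
def fmfStep (parts : List (List Char)) (i : Nat) (acc : Nat × Option String) (f : String) :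
    Nat × Option String :=
  if fmfIdxB parts f.toList i < acc.1 then (fmfIdxB parts f.toList i, some f) else acc

lemma fmfIdxB_ge (parts : List (List Char)) (f : List Char) :
    ∀ i, i ≤ parts.length → i ≤ fmfIdxB parts f i := by
  intro i
  induction i using fmfIdxB.induct (parts := parts) (f := f) with
  | case1 i h hp =>
      intro _; rw [fmfIdxB]
      simp only [h, ↓reduceDIte, PySem.List.slice_from_natCast] at hp ⊢
      rw [if_pos hp]
  | case2 i h hp ih =>
      intro _; rw [fmfIdxB]
      simp only [h, ↓reduceDIte, PySem.List.slice_from_natCast] at hp ⊢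
      rw [if_neg hp]
      have := ih (by omega); omega
  | case3 i h => intro _; rw [fmfIdxB]; simp [h]; omega

lemma fmfIdxB_of_pred (parts : List (List Char)) (f : String) (i : Nat)
    (h : i < parts.length) (hp : fmfPred parts i f = true) :
    fmfIdxB parts f.toList i = i := by
  rw [fmfIdxB]; unfold fmfPred at hp
  simp only [h, ↓reduceDIte, PySem.List.slice_from_natCast, hp, if_true]

lemma fmfIdxB_of_not_pred (parts : List (List Char)) (f : String) (i : Nat)
    (h : i < parts.length) (hp : fmfPred parts i f = false) :
    fmfIdxB parts f.toList i = fmfIdxB parts f.toList (i + 1) := by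
  rw [fmfIdxB]; unfold fmfPred at hp
  simp only [h, ↓reduceDIte, PySem.List.slice_from_natCast, hp, Bool.false_eq_true, if_false]

lemma fmf_fold_keep (parts : List (List Char)) (i : Nat) (hi : i ≤ parts.length)
    (f0 : String) :
    ∀ post : List String, post.foldl (fmfStep parts i) (i, some f0) = (i, some f0) := by
  intro post
  induction post with
  | nil => rfl
  | cons f post ih =>
      have hge := fmfIdxB_ge parts f.toList i hi
      simp only [List.foldl_cons, fmfStep, if_neg (by omega : ¬ fmfIdxB parts f.toList i < i)]
      exact ih

lemma fmf_fold_pre (parts : List (List Char)) (i : Nat) (hi : i < parts.length)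
    (f0 : String) (hp0 : fmfPred parts i f0 = true) (post : List String) :
    ∀ (pre : List String) (acc : Nat × Option String), i < acc.1 →
      (∀ f ∈ pre, fmfPred parts i f = false) →
      (pre ++ f0 :: post).foldl (fmfStep parts i) acc = (i, some f0) := by
  intro pre
  induction pre with
  | nil =>
      intro acc hacc _
      simp only [List.nil_append, List.foldl_cons, fmfStep,
        fmfIdxB_of_pred parts f0 i hi hp0, if_pos hacc]
      exact fmf_fold_keep parts i (le_of_lt hi) f0 post
  | cons f pre ih =>
      intro acc hacc hpre
      have hf : fmfPred parts i f = false := hpre f (by simp)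
      have hge : i + 1 ≤ fmfIdxB parts f.toList i := by
        rw [fmfIdxB_of_not_pred parts f i hi hf]
        exact fmfIdxB_ge parts f.toList (i + 1) hi
      simp only [List.cons_append, List.foldl_cons]
      by_cases hlt : fmfIdxB parts f.toList i < acc.1
      · rw [show fmfStep parts i acc f = (fmfIdxB parts f.toList i, some f) by
          simp [fmfStep, hlt]]
        exact ih _ (by omega) (fun g hg => hpre g (by simp [hg]))
      · rw [show fmfStep parts i acc f = acc by simp [fmfStep, hlt]]
        exact ih _ hacc (fun g hg => hpre g (by simp [hg]))

lemma fmf_fold_congr (parts : List (List Char)) (i : Nat) (hi : i < parts.length)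
    (files : List String) (hnone : ∀ f ∈ files, fmfPred parts i f = false) :
    ∀ acc, files.foldl (fmfStep parts i) acc = files.foldl (fmfStep parts (i + 1)) acc := by
  induction files with
  | nil => intro acc; rfl
  | cons f files ih =>
      intro acc
      have hstep : fmfStep parts i acc f = fmfStep parts (i + 1) acc f := by
        unfold fmfStep
        rw [fmfIdxB_of_not_pred parts f i hi (hnone f (by simp))]
      simp only [List.foldl_cons, hstep]
      exact ih (fun g hg => hnone g (by simp [hg])) _

lemma fmf_fold_top (parts : List (List Char)) :
    ∀ files : List String,
      files.foldl (fmfStep parts parts.length) (parts.length, none) = (parts.length, none) := by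
  intro files
  induction files with
  | nil => rfl
  | cons f files ih =>
      have hidx : fmfIdxB parts f.toList parts.length = parts.length := by
        rw [fmfIdxB]; simp
      simp only [List.foldl_cons, fmfStep, hidx, lt_irrefl, if_false]
      exact ih

-- MAIN: A's suffix-major loop from i equals B's file-major fold with indices from i
lemma fmf_main (parts : List (List Char)) (files : List String) :
    ∀ d i, i ≤ parts.length → parts.length - i = d →
      fmfLoopA parts files i =
        (files.foldl (fmfStep parts i) (parts.length, none)).2 := by
  intro d
  induction d with
  | zero =>
      intro i hle hd
      have : i = parts.length := by omega
      subst this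
      rw [fmfLoopA, fmf_fold_top parts files]
      simp
  | succ d ih =>
      intro i hle hd
      have hi : i < parts.length := by omega
      rw [fmfLoopA]
      have hfn : (fun repo_file : String =>
          PySem.Chars.endswith repo_file.toList
            (PySem.Chars.join ['/'] (PySem.List.slice parts (some (i : Int)) none)))
          = fmfPred parts i := by
        funext g; simp [fmfPred]
      simp only [hi, ↓reduceDIte, hfn]
      cases hf : files.find? (fmfPred parts i) with
      | some f0 =>
          rw [List.find?_eq_some_iff_append] at hf
          obtain ⟨hp0, pre, post, hsplit, hpre⟩ := hf
          rw [hsplit,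
            fmf_fold_pre parts i hi f0 hp0 post pre (parts.length, none) hi
              (fun g hg => by simpa using hpre g hg)]
      | none =>
          have hnone : ∀ f ∈ files, fmfPred parts i f = false := by
            intro g hg
            simpa using List.find?_eq_none.mp hf g hg
          rw [fmf_fold_congr parts i hi files hnone]
          exact ih (i + 1) (by omega) (by omega)

lemma fmfLoopA_none (parts : List (List Char)) (files : List String) :
    ∀ d i, parts.length - i = d → fmfLoopA parts files i = none →
      ∀ k, i ≤ k → k < parts.length → ∀ f ∈ files, fmfPred parts k f = false := by
  intro d
  induction d with
  | zero => intro i hd _ k hik hk; omega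
  | succ d ih =>
      intro i hd hnone k hik hk f hf
      have hi : i < parts.length := by omega
      rw [fmfLoopA] at hnone
      have hfn : (fun repo_file : String =>
          PySem.Chars.endswith repo_file.toList
            (PySem.Chars.join ['/'] (PySem.List.slice parts (some (i : Int)) none)))
          = fmfPred parts i := by
        funext g; simp [fmfPred]
      simp only [hi, ↓reduceDIte, hfn] at hnone
      cases hf2 : files.find? (fmfPred parts i) with
      | some f0 => rw [hf2] at hnone; exact absurd hnone (by simp)
      | none =>
          rw [hf2] at hnone
          rcases Nat.eq_or_lt_of_le hik with heq | hlt
          · subst heq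
            simpa using List.find?_eq_none.mp hf2 f hf
          · exact ih (i + 1) (by omega) hnone k hlt hk f hf

lemma splitOn_go_len (sep : List Char) :
    ∀ (fuel : Nat) (l cur : List Char) (acc : List (List Char)),
      acc.length < (PySem.Chars.splitOn.go sep fuel l cur acc).length := by
  intro fuel
  induction fuel with
  | zero => intro l cur acc; simp [PySem.Chars.splitOn.go]
  | succ fuel ih =>
      intro l cur acc
      cases l with
      | nil => simp [PySem.Chars.splitOn.go]
      | cons c rest =>
          rw [PySem.Chars.splitOn.go]
          by_cases hp : sep.isPrefixOf (c :: rest) = true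
          · simp only [hp, if_true]
            have := ih (List.drop sep.length (c :: rest)) [] (cur.reverse :: acc)
            simp at this ⊢; omega
          · simp only [hp]
            exact ih rest (c :: cur) acc

lemma splitOn_ne_nil (cs sep : List Char) : PySem.Chars.splitOn cs sep ≠ [] := by
  have := splitOn_go_len sep (cs.length + 1) cs [] []
  unfold PySem.Chars.splitOn
  intro h
  rw [h] at this
  simp at this

-- ===== VERDICT (by name: the statement is the Claim_ definition above) =====
theorem fuzzy_match_file_py_spec : Claim_equal_fuzzy_match_file_py := by
  intro file_path all_files _
  unfold Spec_fuzzy_match_file_py fuzzy_match_file_py fuzzy_match_file_py_alt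
  by_cases hmem : file_path ∈ all_files
  · simp [hmem]
  · simp only [hmem, if_false]
    set parts := PySem.Chars.splitOn file_path.toList ['/'] with hparts
    have hne : parts ≠ [] := splitOn_ne_nil _ _
    have hlen : 0 < parts.length := List.length_pos_iff.mpr hne
    have hmain := fmf_main parts all_files (parts.length - 0) 0 (Nat.zero_le _) rfl
    have hstep : (fun (acc : Nat × Option String) f =>
        let i := fmfIdxB parts f.toList 0
        if i < acc.1 then (i, some f) else acc) = fmfStep parts 0 := rfl
    rw [hstep]
    cases hA : fmfLoopA parts all_files 0 with
    | some f => rw [hA] at hmain; rw [← hmain]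
    | none =>
        rw [hA] at hmain
        rw [← hmain]
        -- A's filename fallback returns none: the loop already tried the bare filename
        have hall : ∀ f ∈ all_files, fmfPred parts (parts.length - 1) f = false :=
          fmfLoopA_none parts all_files (parts.length - 0) 0 rfl hA
            (parts.length - 1) (Nat.zero_le _) (by omega)
        have hfile : PySem.List.pyGetD parts (-1) ([] : List Char) = parts.getLast hne :=
          PySem.List.pyGetD_neg_one parts [] hne
        have hdrop : parts.drop (parts.length - 1) = [parts.getLast hne] :=
          List.drop_length_sub_one hne
        have hfilter : all_files.filter
            (fun f => PySem.Chars.endswith f.toList (PySem.List.pyGetD parts (-1) [])) = [] := by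
          rw [List.filter_eq_nil_iff]
          intro f hf
          have := hall f hf
          unfold fmfPred at this
          rw [hdrop, PySem.Chars.join_singleton] at this
          rw [hfile]
          simp [this]
        rw [hfilter]
        simp
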